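-- pv_equiv track=rewrite | github.com/quentin-auge/draw | lib/dataset.py | reconstruct_strokes
-- ===== SOURCE A (Python) =====
-- def reconstruct_strokes(flat_strokes, initial_point=(0, 0)):
--     """
--     Reconstruct a list of strokes formatted as in the original dataset
--     from a list of flattened and transformed strokes.
--
--     The first point may have been lost in the transformation process. It is
--     therefore possible to supply it to reconstruct the original strokes
--     without loosing information.
--     """
--
--     x, y = initial_point
--
--     strokes = []
--     stroke_xs, stroke_ys = [], []
--     for delta_x, delta_y, *stroke_state in flat_strokes:
--         x, y = x + delta_x, y + delta_y
--
--         _, is_end_of_stroke, is_end_of_drawing = stroke_state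
--
--         if is_end_of_stroke:
--             # Start a new stroke
--             strokes.append([stroke_xs, stroke_ys])
--             stroke_xs, stroke_ys = [], []
--
--         stroke_xs.append(x)
--         stroke_ys.append(y)
--
--         if is_end_of_drawing:
--             # Finish drawing
--             strokes.append((stroke_xs, stroke_ys))
--             stroke_xs, stroke_ys = [], []
--             break
--
--     # In case there is no end_of_drawing state in the drawing.
--     # Can happen when the model does the drawing.
--     if stroke_xs and stroke_ys:
--         strokes.append((stroke_xs, stroke_ys))
--
--     return strokes
-- ===== SOURCE B (Python) =====
-- def reconstruct_strokes(flat_strokes, initial_point=(0, 0)):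
--     # Phase 1: truncate at the first end_of_drawing marker (inclusive).
--     cut = len(flat_strokes)
--     for i, rec in enumerate(flat_strokes):
--         if rec[4]:
--             cut = i + 1
--             break
--     pts = flat_strokes[:cut]
--
--     # Phase 2: absolute coordinates by prefix-summing the deltas.
--     x, y = initial_point
--     xs, ys, flags = [], [], []
--     for delta_x, delta_y, _, is_end_of_stroke, _ in pts:
--         x, y = x + delta_x, y + delta_y
--         xs.append(x)
--         ys.append(y)
--         flags.append(is_end_of_stroke)
--
--     # Phase 3: split into strokes at the end_of_stroke flags
--     # (a flagged point closes the group of the points before it).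
--     strokes = []
--     start = 0
--     for i, flag in enumerate(flags):
--         if flag:
--             strokes.append([xs[start:i], ys[start:i]])
--             start = i
--     tail_xs, tail_ys = xs[start:], ys[start:]
--     if tail_xs:
--         strokes.append((tail_xs, tail_ys))
--     return strokes
-- ===== Notes on version B (the rewrite author's own statement) =====
-- stated objective: alternative
-- what changed: Replaces A's single stateful loop (running coordinates plus a mutable current-stroke accumulator with an early break) by a three-pass pipeline: truncate at the first end_of_drawing marker, prefix-sum the deltas into absolute points, then split the point list at the end_of_stroke flags by index slicing.
import Mathlib
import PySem

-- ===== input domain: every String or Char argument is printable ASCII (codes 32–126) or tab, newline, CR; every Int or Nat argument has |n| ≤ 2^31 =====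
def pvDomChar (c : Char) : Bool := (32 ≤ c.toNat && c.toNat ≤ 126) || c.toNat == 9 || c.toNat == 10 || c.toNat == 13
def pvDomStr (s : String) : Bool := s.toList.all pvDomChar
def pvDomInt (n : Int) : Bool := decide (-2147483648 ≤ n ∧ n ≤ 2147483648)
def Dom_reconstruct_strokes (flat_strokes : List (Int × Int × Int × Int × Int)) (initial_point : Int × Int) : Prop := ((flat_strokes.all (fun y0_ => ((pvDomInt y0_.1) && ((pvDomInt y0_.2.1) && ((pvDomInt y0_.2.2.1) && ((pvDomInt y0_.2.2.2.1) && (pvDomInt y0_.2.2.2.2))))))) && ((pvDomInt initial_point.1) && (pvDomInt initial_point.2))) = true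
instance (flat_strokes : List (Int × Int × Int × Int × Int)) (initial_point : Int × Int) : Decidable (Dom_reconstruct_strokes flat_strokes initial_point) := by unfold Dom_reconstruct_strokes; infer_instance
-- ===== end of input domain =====

-- B rebuilds the strokes in three passes (truncate at end_of_drawing, prefix-sum the
-- deltas into absolute points, split the points at the end_of_stroke flags) instead of
-- A's single stateful loop; objective: alternative decomposition, same return value.

-- ===== PORT A =====
-- A's single loop: state (x, y, strokes, stroke_xs, stroke_ys); the eod branch breaks
-- after resetting the current stroke, so the trailing `if` never fires after a break.
def goA : List (Int × Int × Int × Int × Int) → Int → Int → List (List (List Int)) → List Int → List Int → List (List (List Int))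
  | [], _, _, strokes, sxs, sys =>
      if sxs ≠ [] ∧ sys ≠ [] then strokes ++ [[sxs, sys]] else strokes
  | (dx, dy, _, eos, eod) :: rest, x, y, strokes, sxs, sys =>
      let x := x + dx
      let y := y + dy
      let st := if eos ≠ 0 then (strokes ++ [[sxs, sys]], ([] : List Int), ([] : List Int)) else (strokes, sxs, sys)
      let sxs := st.2.1 ++ [x]
      let sys := st.2.2 ++ [y]
      if eod ≠ 0 then st.1 ++ [[sxs, sys]]
      else goA rest x y st.1 sxs sys

def reconstruct_strokes (flat_strokes : List (Int × Int × Int × Int × Int)) (initial_point : Int × Int) : List (List (List Int)) :=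
  goA flat_strokes initial_point.1 initial_point.2 [] [] []

-- ===== PORT B =====
-- Phase 1: index (+1) of the first end_of_drawing marker, defaulting to the length.
def bCut : List (Int × Int × Int × Int × Int) → Nat → Nat
  | [], n => n
  | rec :: rest, n => if rec.2.2.2.2 ≠ 0 then n + 1 else bCut rest (n + 1)

-- Phase 2: prefix sums; appends x, y and the end_of_stroke flag of each point.
def bPhase : List (Int × Int × Int × Int × Int) → Int → Int → List Int → List Int → List Int → List Int × List Int × List Int
  | [], _, _, xs, ys, fs => (xs, ys, fs)
  | (dx, dy, _, eos, _) :: rest, x, y, xs, ys, fs =>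
      bPhase rest (x + dx) (y + dy) (xs ++ [x + dx]) (ys ++ [y + dy]) (fs ++ [eos])

-- Phase 3: split by index: a flagged point i closes the group xs[start:i], ys[start:i].
def bSplit (xs ys : List Int) : List Int → Nat → Nat → List (List (List Int)) → List (List (List Int))
  | [], _, start, acc =>
      let txs := xs.drop start
      let tys := ys.drop start
      if txs ≠ [] then acc ++ [[txs, tys]] else acc
  | f :: rest, i, start, acc =>
      if f ≠ 0 then
        bSplit xs ys rest (i + 1) i (acc ++ [[(xs.drop start).take (i - start), (ys.drop start).take (i - start)]])
      else bSplit xs ys rest (i + 1) start acc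

def reconstruct_strokes_alt (flat_strokes : List (Int × Int × Int × Int × Int)) (initial_point : Int × Int) : List (List (List Int)) :=
  let cut := bCut flat_strokes 0
  let pts := flat_strokes.take cut
  let p := bPhase pts initial_point.1 initial_point.2 [] [] []
  bSplit p.1 p.2.1 p.2.2 0 0 []

-- ===== PRECONDITION & SPEC =====
def Spec_reconstruct_strokes (flat_strokes : List (Int × Int × Int × Int × Int)) (initial_point : Int × Int) (out : List (List (List Int))) : Prop := out = reconstruct_strokes_alt flat_strokes initial_point
instance (flat_strokes : List (Int × Int × Int × Int × Int)) (initial_point : Int × Int) (out : List (List (List Int))) : Decidable (Spec_reconstruct_strokes flat_strokes initial_point out) := by unfold Spec_reconstruct_strokes; infer_instance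

-- ===== CLAIM (what is proved, stated in full; the proofs are below) =====
def Claim_equal_reconstruct_strokes : Prop := ∀ (flat_strokes : List (Int × Int × Int × Int × Int)) (initial_point : Int × Int), Dom_reconstruct_strokes flat_strokes initial_point → Spec_reconstruct_strokes flat_strokes initial_point (reconstruct_strokes flat_strokes initial_point)

-- ===== LEMMAS AND PROOFS =====

-- A without the strokes accumulator.
def specA : List (Int × Int × Int × Int × Int) → Int → Int → List Int → List Int → List (List (List Int))
  | [], _, _, sxs, sys => if sxs ≠ [] ∧ sys ≠ [] then [[sxs, sys]] else []
  | (dx, dy, _, eos, eod) :: rest, x, y, sxs, sys =>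
      let x := x + dx
      let y := y + dy
      let st := if eos ≠ 0 then ([[sxs, sys]], ([] : List Int), ([] : List Int)) else ([], sxs, sys)
      let sxs := st.2.1 ++ [x]
      let sys := st.2.2 ++ [y]
      st.1 ++ (if eod ≠ 0 then [[sxs, sys]] else specA rest x y sxs sys)

theorem goA_eq_specA : ∀ (l : List (Int × Int × Int × Int × Int)) (x y : Int) (strokes : List (List (List Int))) (sxs sys : List Int),
    goA l x y strokes sxs sys = strokes ++ specA l x y sxs sys := by
  intro l
  induction l with
  | nil => intro x y strokes sxs sys; simp only [goA, specA]; split <;> simp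
  | cons p rest ih =>
      obtain ⟨dx, dy, pn, eos, eod⟩ := p
      intro x y strokes sxs sys
      simp only [goA, specA]
      by_cases he : eos ≠ 0 <;> by_cases hd : eod ≠ 0 <;> simp [he, hd, ih]

-- truncation at the first eod
def truncA : List (Int × Int × Int × Int × Int) → List (Int × Int × Int × Int × Int)
  | [] => []
  | p :: rest => p :: (if p.2.2.2.2 ≠ 0 then [] else truncA rest)

theorem specA_trunc : ∀ (l : List (Int × Int × Int × Int × Int)) (x y : Int) (sxs sys : List Int),
    specA l x y sxs sys = specA (truncA l) x y sxs sys := by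
  intro l
  induction l with
  | nil => intro _ _ _ _; rfl
  | cons p rest ih =>
      obtain ⟨dx, dy, pn, eos, eod⟩ := p
      intro x y sxs sys
      by_cases hd : eod ≠ 0
      · simp [specA, truncA, hd]
      · simp only [specA, truncA, hd]; simp only [ne_eq, not_not] at hd
        simp [hd, ih]

-- absolute points with their eos flags
def absPts : List (Int × Int × Int × Int × Int) → Int → Int → List (Int × Int × Int)
  | [], _, _ => []
  | (dx, dy, _, eos, _) :: rest, x, y => (x + dx, y + dy, eos) :: absPts rest (x + dx) (y + dy)

-- structural splitter over absolute points
def gSplit : List (Int × Int × Int) → List Int → List Int → List (List (List Int))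
  | [], cxs, cys => if cxs ≠ [] then [[cxs, cys]] else []
  | (px, py, f) :: rest, cxs, cys =>
      if f ≠ 0 then [[cxs, cys]] ++ gSplit rest [px] [py]
      else gSplit rest (cxs ++ [px]) (cys ++ [py])

theorem specA_eq_gSplit : ∀ (l : List (Int × Int × Int × Int × Int)) (x y : Int) (sxs sys : List Int),
    sxs.length = sys.length →
    specA (truncA l) x y sxs sys = gSplit (absPts (truncA l) x y) sxs sys := by
  intro l
  induction l with
  | nil =>
      intro x y sxs sys hlen
      by_cases h : sxs = []
      · have h2 : sys = [] := by cases sys <;> simp_all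
        simp [truncA, specA, absPts, gSplit, h, h2]
      · have h2 : sys ≠ [] := by intro hc; subst hc; exact h (by cases sxs <;> simp_all)
        simp [truncA, specA, absPts, gSplit, h, h2]
  | cons p rest ih =>
      obtain ⟨dx, dy, pn, eos, eod⟩ := p
      intro x y sxs sys hlen
      by_cases hd : eod ≠ 0
      · simp only [truncA, hd, if_pos]
        by_cases he : eos ≠ 0 <;>
          simp [specA, absPts, gSplit, he, hd]
      · simp only [truncA]
        simp only [ne_eq, not_not] at hd
        subst hd
        by_cases he : eos ≠ 0
        · simp only [specA, absPts, gSplit, he, if_pos, ite_true]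
          simp only [ne_eq, he, not_false_iff, if_true]
          simp only [List.cons_append, List.nil_append]
          congr 1
          exact ih _ _ _ _ (by simp)
        · simp only [specA, absPts, gSplit, he, ite_false]
          simp only [ne_eq, he, if_false, if_neg]
          simp only [List.nil_append]
          exact ih _ _ _ _ (by simp [hlen])

-- bCut counts
theorem bCut_shift : ∀ (l : List (Int × Int × Int × Int × Int)) (n : Nat),
    bCut l n = n + bCut l 0 := by
  intro l
  induction l with
  | nil => intro n; simp [bCut]
  | cons p rest ih =>
      intro n
      by_cases h : p.2.2.2.2 ≠ 0 <;> simp [bCut, h]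
      rw [ih (n+1), ih 1]; omega

theorem take_bCut : ∀ (l : List (Int × Int × Int × Int × Int)),
    l.take (bCut l 0) = truncA l := by
  intro l
  induction l with
  | nil => rfl
  | cons p rest ih =>
      by_cases h : p.2.2.2.2 ≠ 0
      · simp [bCut, truncA, h]
      · simp only [bCut, if_neg h, truncA, if_neg h]
        rw [bCut_shift rest 1, Nat.add_comm, List.take_succ_cons, ih]

-- bPhase yields the three projections of absPts
theorem bPhase_eq : ∀ (l : List (Int × Int × Int × Int × Int)) (x y : Int) (xs ys fs : List Int),
    bPhase l x y xs ys fs =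
      (xs ++ (absPts l x y).map (·.1), ys ++ (absPts l x y).map (·.2.1), fs ++ (absPts l x y).map (·.2.2)) := by
  intro l
  induction l with
  | nil => intro x y xs ys fs; simp [bPhase, absPts]
  | cons p rest ih =>
      obtain ⟨dx, dy, pn, eos, eod⟩ := p
      intro x y xs ys fs
      simp [bPhase, absPts, ih]

-- the index/slice splitter agrees with the structural one
theorem bSplit_eq_gSplit : ∀ (ts : List (Int × Int × Int)) (k i start : Nat) (acc : List (List (List Int))),
    i = ts.length - k → k ≤ ts.length → start ≤ i →
    bSplit (ts.map (·.1)) (ts.map (·.2.1)) (((ts.map (·.2.2)).drop i)) i start acc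
      = acc ++ gSplit (ts.drop i)
          (((ts.drop start).take (i - start)).map (·.1))
          (((ts.drop start).take (i - start)).map (·.2.1)) := by
  intro ts k
  induction k with
  | zero =>
      intro i start acc hi hk hs
      subst hi
      simp only [Nat.sub_zero] at *
      rw [List.drop_length, List.drop_of_length_le (by simp)]
      simp only [bSplit, gSplit]
      have htake : (ts.drop start).take (ts.length - start) = ts.drop start := by
        apply List.take_of_length_le; simp
      rw [← List.map_drop, ← List.map_drop, htake]
      by_cases h : (ts.drop start).map (·.1) = [] <;> simp_all
  | succ k ih =>
      intro i start acc hi hk hs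
      subst hi
      have hlt : ts.length - (k+1) < ts.length := by omega
      set i := ts.length - (k+1) with hidef
      have hdrop : ∀ (f : (Int × Int × Int) → Int), (ts.map f).drop i = f ts[i] :: (ts.map f).drop (i+1) := by
        intro f
        rw [List.drop_eq_getElem_cons (by simpa using hlt)]
        simp [hlt]
      have hdropt : ts.drop i = ts[i] :: ts.drop (i+1) := List.drop_eq_getElem_cons hlt
      have hnext : i + 1 = ts.length - k := by omega
      rw [hdrop (·.2.2), hdropt]
      rcases ht : ts[i] with ⟨px, py, f⟩
      simp only [ht]
      simp only [bSplit, gSplit]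
      by_cases hf : f ≠ 0
      · rw [if_pos hf, if_pos hf]
        rw [hnext, ih (ts.length - k) i _ rfl (by omega) (by omega)]
        have h1 : (ts.drop i).take (ts.length - k - i) = [ts[i]] := by
          have hone : ts.length - k - i = 1 := by omega
          rw [hone, hdropt, List.take_succ_cons, List.take_zero]
        simp only [← List.map_take, ← List.map_drop, h1, ht]
        simp
      · rw [if_neg hf, if_neg hf]
        rw [hnext, ih (ts.length - k) start _ rfl (by omega) (by omega)]
        have h2 : (ts.drop start).take (ts.length - k - start) = (ts.drop start).take (i - start) ++ [ts[i]] := by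
          have hv : ts.length - k - start = (i - start) + 1 := by omega
          rw [hv, List.take_add_one]
          have hg : (ts.drop start)[i - start]? = some ts[i] := by
            rw [List.getElem?_drop]
            have hsum : start + (i - start) = i := by omega
            rw [hsum, List.getElem?_eq_getElem hlt]
          simp [hg]
        simp only [← List.map_take, ← List.map_drop, h2, ht]
        simp

theorem alt_unfolded (flat : List (Int × Int × Int × Int × Int)) (ip : Int × Int) :
    reconstruct_strokes_alt flat ip =
      bSplit (bPhase (flat.take (bCut flat 0)) ip.1 ip.2 [] [] []).1
        (bPhase (flat.take (bCut flat 0)) ip.1 ip.2 [] [] []).2.1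
        (bPhase (flat.take (bCut flat 0)) ip.1 ip.2 [] [] []).2.2 0 0 [] := rfl

-- ===== VERDICT (by name: the statement is the Claim_ definition above) =====
theorem reconstruct_strokes_spec : Claim_equal_reconstruct_strokes := by
  intro flat ip _
  show reconstruct_strokes flat ip = reconstruct_strokes_alt flat ip
  rw [alt_unfolded, take_bCut, bPhase_eq]
  unfold reconstruct_strokes
  rw [goA_eq_specA, specA_trunc, specA_eq_gSplit _ _ _ _ _ rfl]
  simp only [List.nil_append]
  set ts := absPts (truncA flat) ip.1 ip.2 with hts
  have := bSplit_eq_gSplit ts ts.length 0 0 [] (by omega) (le_refl _) (by omega)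
  simpa using this.symm
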